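-- pv_equiv track=rewrite | github.com/Denish-Pasupuleti/UG_Projects | 201-Python/Homeworks/hw6/hw6_part3.py | replace_hidden_message
-- ===== SOURCE A (Python) =====
-- def replace_hidden_message(encrypted_message, hidden_message, new_hidden_message):
--     """
--     Replaces the hidden_message hidden in input_string
--     with new_hidden_message
--     :param encrypted_message: a message with something
--     hidden in it
--     :param hidden_message: the old hidden message
--     :param new_hidden_message: the new hidden message
--     that will replace it
--     :return: encrypted_message where the first occurrence
--     of hidden_message is replaced with new_hidden_message
--     """
--     new_string = ""
--     if len(new_hidden_message) != len(hidden_message):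
--         return "The new message must be the same length.  Good day."
--     if len(encrypted_message) != 0 and len(hidden_message) != 0:
--         if encrypted_message[0] == hidden_message[0]:
--             # adds first char in new hidden string
--             new_string += new_hidden_message[0]
--             return new_string + replace_hidden_message(encrypted_message[1:],
--                                                        hidden_message[1:],
--                                                        new_hidden_message[1:])
--         else:
--             # if not equal to hidden_string[0] adds encrypted[0]
--             new_string += encrypted_message[0]
--             return new_string + replace_hidden_message(encrypted_message[1:],
--                                                        hidden_message,
--                                                        new_hidden_message)
--     else:
--         return encrypted_message
-- ===== SOURCE B (Python) =====
-- def replace_hidden_message(encrypted_message, hidden_message, new_hidden_message):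
--     if len(new_hidden_message) != len(hidden_message):
--         return "The new message must be the same length.  Good day."
--     out = []
--     j = 0
--     for c in encrypted_message:
--         if j < len(hidden_message) and c == hidden_message[j]:
--             out.append(new_hidden_message[j])
--             j += 1
--         else:
--             out.append(c)
--     return "".join(out)
-- ===== Notes on version B (the rewrite author's own statement) =====
-- stated objective: faster
-- what changed: Replaced the recursive string-slicing scan (O(n) slice copies per character) with a single iterative pass using an index pointer into the hidden message and a list accumulator.
import Mathlib
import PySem

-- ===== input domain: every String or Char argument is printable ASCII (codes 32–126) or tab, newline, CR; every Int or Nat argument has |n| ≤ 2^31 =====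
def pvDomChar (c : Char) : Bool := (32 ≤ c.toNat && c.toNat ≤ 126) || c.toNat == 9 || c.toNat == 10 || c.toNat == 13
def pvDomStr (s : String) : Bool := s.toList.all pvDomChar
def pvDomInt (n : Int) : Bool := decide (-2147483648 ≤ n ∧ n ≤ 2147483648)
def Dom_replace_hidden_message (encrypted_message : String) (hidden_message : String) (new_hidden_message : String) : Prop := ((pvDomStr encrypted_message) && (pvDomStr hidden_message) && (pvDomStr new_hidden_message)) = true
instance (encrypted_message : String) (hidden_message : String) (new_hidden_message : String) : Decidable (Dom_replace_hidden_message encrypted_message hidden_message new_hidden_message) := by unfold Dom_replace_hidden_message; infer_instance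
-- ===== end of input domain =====

-- B replaces A's recursive string-slicing scan with one iterative pass using an
-- index pointer (objective: faster).

-- ===== PORT A =====
-- A's error string, as a list of chars
def pvErrMsg : List Char := "The new message must be the same length.  Good day.".toList

-- literal port of A's recursion, on List Char (strings as char lists); branches in
-- A's order: length check, then the two nonempty tests, then the head comparison.
-- Python's e[0]/h[0]/n[0] are headD here: exact, since they are only reached with
-- the lists nonempty (guarded by the nonempty tests and the length check).
def pvAGo (e h n : List Char) : List Char :=
  if n.length ≠ h.length then pvErrMsg
  else if _he : e.length ≠ 0 ∧ h.length ≠ 0 then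
    if e.headD ' ' = h.headD ' ' then
      n.headD ' ' :: pvAGo e.tail h.tail n.tail
    else
      e.headD ' ' :: pvAGo e.tail h n
  else e
termination_by e.length
decreasing_by
  all_goals simp only [List.length_tail]; omega

def replace_hidden_message (encrypted_message : String) (hidden_message : String) (new_hidden_message : String) : String :=
  String.ofList (pvAGo encrypted_message.toList hidden_message.toList new_hidden_message.toList)

-- ===== PORT B =====
-- one step of B's loop body: push the replacement (advancing j) on a pointer match, else push c
def pvBStep (h n : List Char) (st : List Char × Nat) (c : Char) : List Char × Nat :=
  if st.2 < h.length ∧ c = h.getD st.2 ' ' then (n.getD st.2 ' ' :: st.1, st.2 + 1)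
  else (c :: st.1, st.2)

def replace_hidden_message_alt (encrypted_message : String) (hidden_message : String) (new_hidden_message : String) : String :=
  if new_hidden_message.length ≠ hidden_message.length then
    String.ofList pvErrMsg
  else
    let h := hidden_message.toList
    let n := new_hidden_message.toList
    let res := encrypted_message.toList.foldl (pvBStep h n) ([], 0)
    String.ofList res.1.reverse

-- ===== PRECONDITION & SPEC =====
def Spec_replace_hidden_message (encrypted_message : String) (hidden_message : String) (new_hidden_message : String) (out : String) : Prop := out = replace_hidden_message_alt encrypted_message hidden_message new_hidden_message
instance (encrypted_message : String) (hidden_message : String) (new_hidden_message : String) (out : String) : Decidable (Spec_replace_hidden_message encrypted_message hidden_message new_hidden_message out) := by unfold Spec_replace_hidden_message; infer_instance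

-- ===== CLAIM (what is proved, stated in full; the proofs are below) =====
def Claim_equal_replace_hidden_message : Prop := ∀ (encrypted_message : String) (hidden_message : String) (new_hidden_message : String), Dom_replace_hidden_message encrypted_message hidden_message new_hidden_message → Spec_replace_hidden_message encrypted_message hidden_message new_hidden_message (replace_hidden_message encrypted_message hidden_message new_hidden_message)

-- ===== LEMMAS AND PROOFS =====

-- once the pointer has run past the hidden message, B's loop copies the rest verbatim
theorem pvB_past (h n : List Char) (e : List Char) (acc : List Char) (j : Nat)
    (hj : h.length ≤ j) :
    e.foldl (pvBStep h n) (acc, j) = (e.reverse ++ acc, j) := by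
  induction e generalizing acc with
  | nil => simp
  | cons c e' ih =>
      have : pvBStep h n (acc, j) c = (c :: acc, j) := by
        simp [pvBStep]; omega
      simp [List.foldl, this, ih]

-- main invariant: with equal remaining lengths, B's fold from pointer j computes
-- A's recursion on the suffixes h.drop j / n.drop j
theorem pvKey (h n : List Char) (hlen : n.length = h.length) :
    ∀ (e : List Char) (j : Nat) (acc : List Char),
      (e.foldl (pvBStep h n) (acc, j)).1.reverse
        = acc.reverse ++ pvAGo e (h.drop j) (n.drop j) := by
  intro e
  induction e with
  | nil =>
      intro j acc
      rw [pvAGo]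
      simp [List.length_drop, hlen]
  | cons c e' ih =>
      intro j acc
      by_cases hj : j < h.length
      · -- the suffixes are nonempty
        obtain ⟨d, h', hh⟩ : ∃ d h', h.drop j = d :: h' := by
          cases hd : h.drop j with
          | nil => exfalso; have := congrArg List.length hd; simp [List.length_drop] at this; omega
          | cons d h' => exact ⟨d, h', rfl⟩
        have hjn : j < n.length := by omega
        obtain ⟨x, n', hn⟩ : ∃ x n', n.drop j = x :: n' := by
          cases hd : n.drop j with
          | nil => exfalso; have := congrArg List.length hd; simp [List.length_drop] at this; omega
          | cons x n' => exact ⟨x, n', rfl⟩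
        have hdj : h[j]? = some d := by
          have h0 : (h.drop j)[0]? = some d := by rw [hh]; rfl
          simpa [List.getElem?_drop] using h0
        have hnj : n[j]? = some x := by
          have h0 : (n.drop j)[0]? = some x := by rw [hn]; rfl
          simpa [List.getElem?_drop] using h0
        have hd' : h.getD j ' ' = d := by
          rw [List.getD_eq_getElem?_getD, hdj]; rfl
        have hx' : n.getD j ' ' = x := by
          rw [List.getD_eq_getElem?_getD, hnj]; rfl
        have hleq : ¬ ((x :: n').length ≠ (d :: h').length) := by
          have : (x :: n').length = (d :: h').length := by
            rw [← hh, ← hn]; simp [List.length_drop, hlen]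
          simp [this]
        have hdrop1 : h.drop (j+1) = h' := by
          rw [← List.drop_drop, hh]; simp
        have hndrop1 : n.drop (j+1) = n' := by
          rw [← List.drop_drop, hn]; simp
        by_cases hc : c = d
        · have step : pvBStep h n (acc, j) c = (x :: acc, j + 1) := by
            simp only [pvBStep]
            rw [if_pos ⟨hj, by rw [hd']; exact hc⟩, hx']
          rw [List.foldl_cons, step, ih (j+1) (x :: acc), hdrop1, hndrop1]
          have harm : pvAGo (c :: e') (h.drop j) (n.drop j) = x :: pvAGo e' h' n' := by
            rw [hh, hn, pvAGo, if_neg hleq]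
            simp [hc]
          rw [harm]
          simp
        · have step : pvBStep h n (acc, j) c = (c :: acc, j) := by
            simp only [pvBStep]
            rw [if_neg]
            rintro ⟨_, hcd⟩
            rw [hd'] at hcd
            exact hc hcd
          rw [List.foldl_cons, step, ih j (c :: acc)]
          have harm : pvAGo (c :: e') (h.drop j) (n.drop j) = c :: pvAGo e' (h.drop j) (n.drop j) := by
            rw [hh, hn, pvAGo, if_neg hleq, dif_pos ⟨by simp, by simp⟩,
               if_neg (by simpa using hc)]
            simp only [List.headD_cons, List.tail_cons]
          rw [harm]
          simp
      · -- pointer past the end: both copy e verbatim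
        have hj' : h.length ≤ j := Nat.le_of_not_lt hj
        rw [pvB_past h n (c :: e') acc j hj']
        have hH : h.drop j = [] := List.drop_eq_nil_of_le hj'
        have hN : n.drop j = [] := List.drop_eq_nil_of_le (by omega)
        rw [hH, hN, pvAGo]
        simp

theorem replace_hidden_message_eq (e h n : String) :
    replace_hidden_message e h n = replace_hidden_message_alt e h n := by
  unfold replace_hidden_message replace_hidden_message_alt
  by_cases hlen : n.length = h.length
  · have hl : n.toList.length = h.toList.length := by
      rw [String.length_toList, String.length_toList]; exact hlen
    rw [if_neg (by simp [hlen])]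
    have hkey := pvKey h.toList n.toList hl e.toList 0 []
    simp only [List.drop_zero, List.reverse_nil, List.nil_append] at hkey
    rw [← hkey]
  · have hl : n.toList.length ≠ h.toList.length := by
      rw [String.length_toList, String.length_toList]; exact hlen
    rw [pvAGo, if_pos hl, if_pos hlen]

-- ===== VERDICT (by name: the statement is the Claim_ definition above) =====
theorem replace_hidden_message_spec : Claim_equal_replace_hidden_message := by
  intro e h n _
  unfold Spec_replace_hidden_message
  exact replace_hidden_message_eq e h n
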